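-- pv_equiv track=rewrite | github.com/Aqin2/UCF-Short-Sell | scrape_short_reports.py | looks_like_report
-- ===== SOURCE A (Python) =====
-- REPORT_KEYWORDS = [
--     "report",
--     "research",
--     "whitepaper",
--     "pdf",
--     "short",
--     "analysis",
--     "expose",
--     "rebuttal",
--     "investigation",
-- ]
--
-- def is_pdf_link(href: str):
--     return href.lower().split('?')[0].endswith('.pdf')
--
-- def looks_like_report(href: str, text: str):
--     s = (href or "") + " " + (text or "")
--     s = s.lower()
--     for kw in REPORT_KEYWORDS:
--         if kw in s:
--             return True
--     # also treat all pdfs as potential reports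
--     if is_pdf_link(href):
--         return True
--     return False
-- ===== SOURCE B (Python) =====
-- REPORT_KEYWORDS = [
--     "report",
--     "research",
--     "whitepaper",
--     "pdf",
--     "short",
--     "analysis",
--     "expose",
--     "rebuttal",
--     "investigation",
-- ]
--
-- def _build_trie(words):
--     # node = [terminal_flag, {char: child_node}]
--     root = [False, {}]
--     for w in words:
--         node = root
--         for ch in w:
--             node = node[1].setdefault(ch, [False, {}])
--         node[0] = True
--     return root
--
-- _TRIE = _build_trie(REPORT_KEYWORDS)
--
-- def looks_like_report(href, text):
--     # Multi-pattern search with a prefix trie built once from the keywords: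
--     # at each start position, walk the trie along the string; reaching any
--     # terminal node means some keyword occurs there.  The original's PDF
--     # branch is redundant (a '.pdf' link always contains the keyword 'pdf').
--     s = ((href or "") + " " + (text or "")).lower()
--     for i in range(len(s)):
--         node = _TRIE
--         j = i
--         while True:
--             if node[0]:
--                 return True
--             if j >= len(s) or s[j] not in node[1]:
--                 break
--             node = node[1][s[j]]
--             j += 1
--     return False
-- ===== Notes on version B (the rewrite author's own statement) =====
-- stated objective: alternative
-- what changed: B builds a prefix trie of the nine keywords once and scans the combined lowered string with a trie walk per position, replacing nine independent substring scans plus a redundant URL-splitting PDF check (dropped because a '.pdf' link always contains the keyword 'pdf').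
import Mathlib
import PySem

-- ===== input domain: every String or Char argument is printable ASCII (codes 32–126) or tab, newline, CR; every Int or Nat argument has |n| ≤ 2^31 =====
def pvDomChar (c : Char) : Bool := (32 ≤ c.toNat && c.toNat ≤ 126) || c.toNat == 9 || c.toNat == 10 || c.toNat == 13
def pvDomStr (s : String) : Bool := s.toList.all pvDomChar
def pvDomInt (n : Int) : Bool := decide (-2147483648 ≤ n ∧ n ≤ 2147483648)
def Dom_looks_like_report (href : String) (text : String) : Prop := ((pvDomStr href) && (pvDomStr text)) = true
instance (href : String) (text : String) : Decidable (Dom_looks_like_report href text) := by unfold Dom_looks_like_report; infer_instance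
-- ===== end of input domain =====

-- B builds a prefix trie of the keywords once and walks it per start position,
-- replacing A's nine independent substring scans and its redundant PDF branch
-- (a '.pdf' link always contains the keyword 'pdf'); objective: alternative.

-- ===== PORT A =====
def pvKeywords : List (List Char) :=
  ["report".toList, "research".toList, "whitepaper".toList, "pdf".toList, "short".toList,
   "analysis".toList, "expose".toList, "rebuttal".toList, "investigation".toList]

-- href.lower().split('?')[0].endswith('.pdf'); split('?') always returns a nonempty list and
-- '?' ≠ "", so the pyGetD default [] is never used (exact).
def pvIsPdfLink (href : String) : Bool :=
  PySem.Chars.endswith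
    (PySem.List.pyGetD (PySem.Chars.splitOn (PySem.Chars.lower href.toList) ['?']) 0 [])
    ".pdf".toList

-- (href or "") + " " + (text or "") — 'x or ""' is the identity on str arguments
def looks_like_report (href : String) (text : String) : Bool :=
  let s := PySem.Chars.lower (href.toList ++ ' ' :: text.toList)
  if pvKeywords.any (fun kw => PySem.Chars.isIn kw s) then true
  else if pvIsPdfLink href then true
  else false

-- ===== PORT B =====
-- trie node = [terminal_flag, {char: child}]; explicit child-list type (no nested inductive)
mutual
inductive PvTrie where
  | node : Bool → PvEdges → PvTrie
inductive PvEdges where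
  | nil : PvEdges
  | cons : Char → PvTrie → PvEdges → PvEdges
end

-- dict lookup node[1].get(ch)
def pvFind : PvEdges → Char → Option PvTrie
  | .nil, _ => none
  | .cons c' t es, c => if c = c' then some t else pvFind es c

-- dict write node[1][ch] = child (replace or append)
def pvSet : PvEdges → Char → PvTrie → PvEdges
  | .nil, c, t => .cons c t .nil
  | .cons c' t' es, c, t => if c = c' then .cons c' t es else .cons c' t' (pvSet es c t)

-- inner loop of _build_trie: walk/extend along one word, set the terminal flag at its end
def pvInsert : List Char → PvTrie → PvTrie
  | [], .node _ e => .node true e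
  | c :: rest, .node b e =>
      .node b (pvSet e c (pvInsert rest ((pvFind e c).getD (.node false .nil))))

-- _build_trie: fold the words into an empty root
def pvBuildTrie (ws : List (List Char)) : PvTrie :=
  ws.foldl (fun t w => pvInsert w t) (.node false .nil)

def pvKeywordsAlt : List (List Char) :=
  ["report".toList, "research".toList, "whitepaper".toList, "pdf".toList, "short".toList,
   "analysis".toList, "expose".toList, "rebuttal".toList, "investigation".toList]

def pvTrie : PvTrie := pvBuildTrie pvKeywordsAlt

-- the inner while loop: walk the trie along the remaining characters, stop at a
-- terminal node (True) or a missing edge / exhausted string (False)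
def pvMatch : PvTrie → List Char → Bool
  | .node true _, _ => true
  | .node false _, [] => false
  | .node false e, c :: rest =>
      match pvFind e c with
      | some t => pvMatch t rest
      | none => false

-- for i in range(len(s)): walk the trie from position i
def looks_like_report_alt (href : String) (text : String) : Bool :=
  let s := PySem.Chars.lower (href.toList ++ ' ' :: text.toList)
  (List.range s.length).any (fun i => pvMatch pvTrie (s.drop i))

-- ===== PRECONDITION & SPEC =====
def Spec_looks_like_report (href : String) (text : String) (out : Bool) : Prop := out = looks_like_report_alt href text
instance (href : String) (text : String) (out : Bool) : Decidable (Spec_looks_like_report href text out) := by unfold Spec_looks_like_report; infer_instance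

-- ===== CLAIM (what is proved, stated in full; the proofs are below) =====
def Claim_equal_looks_like_report : Prop := ∀ (href : String) (text : String), Dom_looks_like_report href text → Spec_looks_like_report href text (looks_like_report href text)

-- ===== LEMMAS AND PROOFS =====

-- lookup after a write
theorem pv_find_set : ∀ (e : PvEdges) (c d : Char) (t : PvTrie),
    pvFind (pvSet e c t) d = if d = c then some t else pvFind e d
  | .nil, c, d, t => by by_cases h : d = c <;> simp [pvSet, pvFind, h]
  | .cons c' t' es, c, d, t => by
      have ih := pv_find_set es c d t
      by_cases h1 : c = c'
      · subst h1
        by_cases h2 : d = c <;> simp [pvSet, pvFind, h2]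
      · by_cases h2 : d = c'
        · subst h2
          simp [pvSet, pvFind, h1]
          exact fun h => absurd h.symm h1
        · simp [pvSet, pvFind, h1, h2, ih]

theorem pv_match_empty (s : List Char) : pvMatch (.node false .nil) s = false := by
  cases s <;> simp [pvMatch, pvFind]

-- inserting a word adds exactly 'w is a prefix' to the matcher
theorem pv_match_insert (w : List Char) (t : PvTrie) (s : List Char) :
    pvMatch (pvInsert w t) s = (w.isPrefixOf s || pvMatch t s) := by
  induction w generalizing t s with
  | nil =>
      obtain ⟨b, e⟩ := t
      simp [pvInsert, pvMatch, List.isPrefixOf]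
  | cons c rest ih =>
      obtain ⟨b, e⟩ := t
      cases b with
      | true => simp [pvInsert, pvMatch]
      | false =>
          cases s with
          | nil => simp [pvInsert, pvMatch, List.isPrefixOf]
          | cons d s' =>
              by_cases h : d = c
              · subst h
                cases hf : pvFind e d with
                | none =>
                    simp [pvInsert, pvMatch, pv_find_set, hf, ih, pv_match_empty,
                      List.isPrefixOf]
                | some t' =>
                    simp [pvInsert, pvMatch, pv_find_set, hf, ih, List.isPrefixOf]
              · have hbeq : (c == d) = false := beq_eq_false_iff_ne.mpr (fun hh => h hh.symm)
                simp only [pvInsert, pvMatch, pv_find_set, if_neg h, List.isPrefixOf, hbeq,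
                  Bool.false_and, Bool.false_or]

-- folding the insertions: the built trie matches iff some word is a prefix
theorem pv_match_foldl (ws : List (List Char)) (t : PvTrie) (s : List Char) :
    pvMatch (ws.foldl (fun t w => pvInsert w t) t) s
      = (ws.any (fun w => w.isPrefixOf s) || pvMatch t s) := by
  induction ws generalizing t with
  | nil => simp
  | cons w ws ih =>
      simp [List.foldl_cons, ih, pv_match_insert, Bool.or_assoc, Bool.or_comm]

theorem pv_match_build (s : List Char) :
    pvMatch pvTrie s = pvKeywordsAlt.any (fun w => w.isPrefixOf s) := by
  rw [pvTrie, pvBuildTrie, pv_match_foldl, pv_match_empty, Bool.or_false]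

-- accumulator lemma for splitOn.go
theorem pv_go_acc (sep : List Char) (fuel : Nat) (l cur : List Char) (acc : List (List Char)) :
    PySem.Chars.splitOn.go sep fuel l cur acc
      = acc.reverse ++ PySem.Chars.splitOn.go sep fuel l cur [] := by
  induction fuel generalizing l cur acc with
  | zero => simp [PySem.Chars.splitOn.go]
  | succ fuel ih =>
    cases l with
    | nil => simp [PySem.Chars.splitOn.go]
    | cons c rest =>
      rw [PySem.Chars.splitOn.go, PySem.Chars.splitOn.go]
      by_cases h : sep.isPrefixOf (c :: rest) = true
      · simp only [h, if_true]
        rw [ih _ _ (cur.reverse :: acc), ih _ _ [cur.reverse]]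
        simp
      · simp only [h, Bool.false_eq_true, if_false]
        exact ih _ _ acc

-- the first piece of splitOn.go … cur [] is cur.reverse followed by a prefix of l
theorem pv_go_head (sep : List Char) (fuel : Nat) (l cur : List Char) :
    ∃ t, t <+: l ∧ (PySem.Chars.splitOn.go sep fuel l cur []).head? = some (cur.reverse ++ t) := by
  induction fuel generalizing l cur with
  | zero => exact ⟨l, List.prefix_refl l, by simp [PySem.Chars.splitOn.go]⟩
  | succ fuel ih =>
    cases l with
    | nil => exact ⟨[], List.nil_prefix, by simp [PySem.Chars.splitOn.go]⟩
    | cons c rest =>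
      rw [PySem.Chars.splitOn.go]
      by_cases h : sep.isPrefixOf (c :: rest) = true
      · refine ⟨[], List.nil_prefix, ?_⟩
        simp only [h, if_true]
        rw [pv_go_acc sep fuel _ _ [cur.reverse]]
        simp
      · obtain ⟨t, ht, hh⟩ := ih rest (c :: cur)
        refine ⟨c :: t, by simpa using ht, ?_⟩
        simp only [h, Bool.false_eq_true, if_false]
        rw [hh]
        simp

-- the first piece of str.split(sep) is an infix of str
theorem pv_split_head_infix (s sep : List Char) :
    PySem.List.pyGetD (PySem.Chars.splitOn s sep) 0 [] <:+: s := by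
  unfold PySem.Chars.splitOn
  obtain ⟨t, ht, hh⟩ := pv_go_head sep (s.length + 1) s []
  have : PySem.List.pyGetD (PySem.Chars.splitOn.go sep (s.length + 1) s [] []) 0 [] = t := by
    rw [PySem.List.pyGetD_zero]
    cases hgo : PySem.Chars.splitOn.go sep (s.length + 1) s [] [] with
    | nil => simp [hgo] at hh
    | cons x xs => rw [hgo] at hh; simp at hh ⊢; exact hh
  rw [this]
  exact ht.isInfix

-- a pdf link always contains 'pdf' in the combined lowered string
theorem pv_pdf_isIn (href : String) (text : String)
    (h : pvIsPdfLink href = true) :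
    PySem.Chars.isIn "pdf".toList (PySem.Chars.lower (href.toList ++ ' ' :: text.toList)) = true := by
  unfold pvIsPdfLink at h
  rw [PySem.Chars.endswith_iff] at h
  rw [PySem.Chars.isIn_iff_infix]
  have h1 : ".pdf".toList <:+: PySem.Chars.lower href.toList :=
    h.isInfix.trans (pv_split_head_infix _ _)
  have h2 : ("pdf".toList <:+: ".pdf".toList) := by decide
  have h3 : PySem.Chars.lower href.toList <+: PySem.Chars.lower (href.toList ++ ' ' :: text.toList) := by
    simp [PySem.Chars.lower, List.map_append]
  exact (h2.trans h1).trans h3.isInfix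

-- core iff between the position scan and A's substring tests, for nonempty keywords
theorem pv_scan_iff (K : List (List Char)) (hK : ∀ kw ∈ K, kw ≠ []) (s : List Char) :
    ((List.range s.length).any (fun i => K.any (fun kw => kw.isPrefixOf (s.drop i))) = true)
      ↔ (∃ kw ∈ K, PySem.Chars.isIn kw s = true) := by
  simp only [List.any_eq_true, List.mem_range, List.isPrefixOf_iff_prefix]
  constructor
  · rintro ⟨i, _, kw, hkw, hp⟩
    exact ⟨kw, hkw, (PySem.Chars.exists_prefix_drop_iff_isIn kw s).1 ⟨i, hp⟩⟩
  · rintro ⟨kw, hkw, hin⟩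
    obtain ⟨j, hp⟩ := (PySem.Chars.exists_prefix_drop_iff_isIn kw s).2 hin
    refine ⟨j, ?_, kw, hkw, hp⟩
    by_contra hj
    have : List.drop j s = [] := List.drop_eq_nil_of_le (by omega)
    rw [this, List.prefix_nil] at hp
    exact hK kw hkw hp

-- ===== VERDICT (by name: the statement is the Claim_ definition above) =====
theorem looks_like_report_spec : Claim_equal_looks_like_report := by
  intro href text _
  unfold Spec_looks_like_report looks_like_report looks_like_report_alt
  set s := PySem.Chars.lower (href.toList ++ ' ' :: text.toList) with hs
  simp only [pv_match_build]
  have hK : ∀ kw ∈ pvKeywordsAlt, kw ≠ [] := by decide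
  have hiff := pv_scan_iff pvKeywordsAlt hK s
  by_cases hA : pvKeywords.any (fun kw => PySem.Chars.isIn kw s) = true
  · simp only [hA, if_true]
    rw [List.any_eq_true] at hA
    exact (hiff.2 hA).symm
  · simp only [hA, Bool.false_eq_true, if_false]
    by_cases hpdf : pvIsPdfLink href = true
    · simp only [hpdf, if_true]
      have : ∃ kw ∈ pvKeywordsAlt, PySem.Chars.isIn kw s = true :=
        ⟨"pdf".toList, by decide, by rw [hs]; exact pv_pdf_isIn href text hpdf⟩
      exact (hiff.2 this).symm
    · simp only [hpdf, Bool.false_eq_true, if_false]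
      symm
      rw [Bool.eq_false_iff]
      intro hB
      exact hA (List.any_eq_true.2 (hiff.1 hB))
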